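-- pv_equiv track=rewrite | github.com/jacobpodhraski/spreads | addGameIndex.py | createListOfGameIds
-- ===== SOURCE A (Python) =====
-- def createListOfGameIds(numRows):
--
--     row = 1
--     gameId = 1
--     listOfGameIds = [];
--     while (row <= numRows):
--         listOfGameIds.append(gameId)
--         listOfGameIds.append(gameId)
--         row += 2
--         gameId += 1
--
--     return listOfGameIds
-- ===== SOURCE B (Python) =====
-- def createListOfGameIds(numRows):
--     total = 2 * ((numRows + 1) // 2)
--     return [i // 2 + 1 for i in range(total)]
-- ===== Notes on version B (the rewrite author's own statement) =====
-- stated objective: alternative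
-- what changed: Instead of A's while-loop that steps a row counter by 2 and appends each game id twice, B computes the total output length in closed form and derives each element directly from its position (element at index i is i//2 + 1), a single flat index pass with no duplication step.
import Mathlib
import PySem

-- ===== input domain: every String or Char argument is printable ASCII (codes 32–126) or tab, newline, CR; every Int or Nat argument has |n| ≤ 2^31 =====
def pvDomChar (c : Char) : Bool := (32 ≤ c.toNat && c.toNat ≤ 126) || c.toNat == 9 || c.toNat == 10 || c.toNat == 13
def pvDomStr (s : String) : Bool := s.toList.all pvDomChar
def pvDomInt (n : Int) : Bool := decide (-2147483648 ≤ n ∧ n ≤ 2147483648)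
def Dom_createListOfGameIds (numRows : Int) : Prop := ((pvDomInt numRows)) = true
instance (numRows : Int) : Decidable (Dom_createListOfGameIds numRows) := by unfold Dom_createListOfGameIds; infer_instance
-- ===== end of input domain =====

-- B derives each element from its index (i//2 + 1 over a closed-form length) instead of A's step-by-two while loop emitting pairs (objective: alternative).


-- ===== PORT A =====
-- while (row <= numRows): append gameId twice; row += 2; gameId += 1
def createListOfGameIdsLoop (numRows row gameId : Int) (acc : List Int) : List Int :=
  if row ≤ numRows then
    createListOfGameIdsLoop numRows (row + 2) (gameId + 1) (acc ++ [gameId, gameId])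
  else acc
termination_by (numRows + 2 - row).toNat
decreasing_by omega

def createListOfGameIds (numRows : Int) : List Int :=
  createListOfGameIdsLoop numRows 1 1 []

-- ===== PORT B =====
-- total = 2 * ((numRows + 1) // 2); [i // 2 + 1 for i in range(total)]
def createListOfGameIds_alt (numRows : Int) : List Int :=
  (PySem.List.pyRange 0 (2 * PySem.Int.floordiv (numRows + 1) 2) 1).map
    (fun i => PySem.Int.floordiv i 2 + 1)

-- ===== PRECONDITION & SPEC =====
def Spec_createListOfGameIds (numRows : Int) (out : List Int) : Prop := out = createListOfGameIds_alt numRows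
instance (numRows : Int) (out : List Int) : Decidable (Spec_createListOfGameIds numRows out) := by unfold Spec_createListOfGameIds; infer_instance

-- ===== CLAIM =====
def Claim_equal_createListOfGameIds : Prop := ∀ (numRows : Int), Dom_createListOfGameIds numRows → Spec_createListOfGameIds numRows (createListOfGameIds numRows)

-- ===== LEMMAS AND PROOFS =====

-- A's loop, characterised: it appends each id of the remaining range twice.
lemma createListOfGameIdsLoop_eq (k : Nat) :
    ∀ (n row g : Int) (acc : List Int), (n + 2 - row).toNat ≤ k →
    createListOfGameIdsLoop n row g acc =
      acc ++ (PySem.List.pyRange g (g + PySem.Int.floordiv (n - row + 2) 2) 1).flatMap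
        (fun x => [x, x]) := by
  induction k with
  | zero =>
    intro n row g acc hk
    rw [createListOfGameIdsLoop, if_neg (show ¬ row ≤ n by omega),
        PySem.Int.floordiv_eq_ediv_of_pos (by norm_num),
        PySem.List.pyRange_one_eq_nil (by omega)]
    simp
  | succ k ih =>
    intro n row g acc hk
    rw [createListOfGameIdsLoop]
    by_cases hrow : row ≤ n
    · rw [if_pos hrow, ih n (row + 2) (g + 1) (acc ++ [g, g]) (by omega),
          PySem.Int.floordiv_eq_ediv_of_pos (by norm_num),
          PySem.Int.floordiv_eq_ediv_of_pos (by norm_num),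
          show g + (n - row + 2) / 2 = g + 1 + (n - (row + 2) + 2) / 2 by omega,
          PySem.List.pyRange_one_cons (show g < g + 1 + (n - (row + 2) + 2) / 2 by omega)]
      simp
    · rw [if_neg hrow, PySem.Int.floordiv_eq_ediv_of_pos (by norm_num),
          PySem.List.pyRange_one_eq_nil (by omega)]
      simp

-- B's index pass, characterised: mapping i//2+1 over 2p positions lists each id of 1..p twice.
lemma map_halves_eq_flatMap (p : Nat) :
    (PySem.List.pyRange 0 (2 * (p : Int)) 1).map (fun i => PySem.Int.floordiv i 2 + 1) =
      (PySem.List.pyRange 1 ((p : Int) + 1) 1).flatMap (fun x => [x, x]) := by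
  induction p with
  | zero => simp [PySem.List.pyRange_one_eq_nil]
  | succ p ih =>
    push_cast
    have h1 : PySem.Int.floordiv (2 * (p : Int)) 2 = p := by
      rw [PySem.Int.floordiv_eq_ediv_of_pos (by norm_num)]; omega
    have h2 : PySem.Int.floordiv (2 * (p : Int) + 1) 2 = p := by
      rw [PySem.Int.floordiv_eq_ediv_of_pos (by norm_num)]; omega
    rw [show 2 * ((p : Int) + 1) = (2 * p + 1) + 1 by ring,
        PySem.List.pyRange_one_succ_right (by omega),
        PySem.List.pyRange_one_succ_right (by omega),
        PySem.List.pyRange_one_succ_right (show (1:Int) ≤ p + 1 by omega)]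
    simp only [List.map_append, List.flatMap_append, ih,
               List.map_cons, List.map_nil, List.flatMap_cons, List.flatMap_nil, h1, h2]
    simp

-- ===== VERDICT =====
theorem createListOfGameIds_spec : Claim_equal_createListOfGameIds := by
  intro n _
  unfold Spec_createListOfGameIds createListOfGameIds createListOfGameIds_alt
  rw [createListOfGameIdsLoop_eq (n + 2 - 1).toNat n 1 1 [] (by omega),
      show n - 1 + 2 = n + 1 by ring,
      PySem.Int.floordiv_eq_ediv_of_pos (show (0:Int) < 2 by norm_num)]
  by_cases hp : (n + 1) / 2 ≤ 0
  · rw [PySem.List.pyRange_one_eq_nil (by omega),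
        PySem.List.pyRange_one_eq_nil (by omega)]
    simp
  · have h1 : (n + 1) / 2 = (((n + 1) / 2).toNat : Int) := by omega
    rw [h1, map_halves_eq_flatMap,
        show (1:Int) + (((n + 1) / 2).toNat : Int) = (((n + 1) / 2).toNat : Int) + 1 by ring]
    simp
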